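-- pv_equiv track=rewrite | github.com/maxwshen/baseedit-app | lib.py | find_protospacers
-- ===== SOURCE A (Python) =====
-- def find_protospacers(seq):
--   left_margin = 20
--   right_margin = 10
--   ps_len = 20
--   protospacers = []
--   poss = []
--   unique_flags = []
--   for idx in range(left_margin, len(seq) - ps_len - right_margin):
--     ps = seq[idx : idx + ps_len]
--     unique_flags.append(bool(ps not in protospacers))
--     protospacers.append(ps)
--     poss.append(idx)
--   return protospacers, poss, unique_flags
-- ===== SOURCE B (Python) =====
-- def find_protospacers(seq):
--   left_margin = 20
--   right_margin = 10
--   ps_len = 20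
--   poss = list(range(left_margin, len(seq) - ps_len - right_margin))
--   protospacers = [seq[i : i + ps_len] for i in poss]
--   # sort the (window, position) pairs, then one adjacent scan marks every
--   # non-first occurrence of a window: equal windows are contiguous after
--   # sorting and, within a run, ordered by position.
--   pairs = sorted(zip(protospacers, poss))
--   dup_positions = {q for (p, q), (r, _) in zip(pairs[1:], pairs) if p == r}
--   unique_flags = [i not in dup_positions for i in poss]
--   return protospacers, poss, unique_flags
-- ===== Notes on version B (the rewrite author's own statement) =====
-- stated objective: faster
-- what changed: A flags duplicates by testing each new 20-char window for membership in the growing list while appending; B sorts the (window, position) pairs once, detects every non-first occurrence in a single adjacent-equality scan over the sorted list, and then maps positions through that duplicate set.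
import Mathlib
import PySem

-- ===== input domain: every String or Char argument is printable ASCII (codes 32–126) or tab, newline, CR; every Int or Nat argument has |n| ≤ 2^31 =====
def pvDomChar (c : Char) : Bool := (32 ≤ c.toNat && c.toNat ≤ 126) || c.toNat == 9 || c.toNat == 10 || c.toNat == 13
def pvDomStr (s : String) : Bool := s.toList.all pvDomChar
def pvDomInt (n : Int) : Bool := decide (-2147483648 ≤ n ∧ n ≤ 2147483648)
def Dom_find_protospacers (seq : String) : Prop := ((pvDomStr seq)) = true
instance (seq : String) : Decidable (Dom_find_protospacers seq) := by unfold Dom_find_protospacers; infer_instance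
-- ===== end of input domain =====

-- B replaces A's membership-test-while-appending loop by a sort-based duplicate detection:
-- sort the (window, position) pairs once, collect every non-first occurrence in one
-- adjacent-equality scan, then map positions through that duplicate set.

-- ===== PORT A =====
def find_protospacers (seq : String) : List String × List Int × List Bool :=
  let left_margin : Int := 20
  let right_margin : Int := 10
  let ps_len : Int := 20
  (PySem.List.pyRange left_margin (PySem.Str.len seq - ps_len - right_margin) 1).foldl
    (fun acc idx =>
      let ps := PySem.Str.slice seq (some idx) (some (idx + ps_len))
      (acc.1 ++ [ps], acc.2.1 ++ [idx], acc.2.2 ++ [decide (ps ∉ acc.1)]))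
    ([], [], [])

-- ===== PORT B =====
def find_protospacers_alt (seq : String) : List String × List Int × List Bool :=
  let left_margin : Int := 20
  let right_margin : Int := 10
  let ps_len : Int := 20
  let poss := PySem.List.pyRange left_margin (PySem.Str.len seq - ps_len - right_margin) 1
  let protospacers := poss.map (fun i => PySem.Str.slice seq (some i) (some (i + ps_len)))
  -- Python's sorted(zip(...)) compares the tuples lexicographically: sorted2 with fst/snd keys
  let pairs := PySem.List.sorted2 (protospacers.zip poss) (fun t => t.1) (fun t => t.2)
  -- the set comprehension over zip(pairs[1:], pairs); pairs[1:] = pairs.drop 1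
  let dup_positions := PySem.Set.ofList
    ((((pairs.drop 1).zip pairs).filter (fun pr => pr.1.1 == pr.2.1)).map (fun pr => pr.1.2))
  let unique_flags := poss.map (fun i => !(PySem.Set.contains dup_positions i))
  (protospacers, poss, unique_flags)

-- ===== PRECONDITION & SPEC =====
def Spec_find_protospacers (seq : String) (out : List String × List Int × List Bool) : Prop := out = find_protospacers_alt seq
instance (seq : String) (out : List String × List Int × List Bool) : Decidable (Spec_find_protospacers seq out) := by unfold Spec_find_protospacers; infer_instance

-- ===== CLAIM (what is proved, stated in full; the proofs are below) =====
def Claim_equal_find_protospacers : Prop := ∀ (seq : String), Dom_find_protospacers seq → Spec_find_protospacers seq (find_protospacers seq)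

-- ===== LEMMAS AND PROOFS =====

/-- The Bool flags produced by A's loop when the protospacer accumulator starts at `P`. -/
def pvFlagsFrom (g : Int → String) (P : List String) : List Int → List Bool
  | [] => []
  | i :: l => decide (g i ∉ P) :: pvFlagsFrom g (P ++ [g i]) l

/-- Characterisation of A's fold. -/
lemma pvFoldA (g : Int → String) (l : List Int) (P : List String) (Q : List Int) (F : List Bool) :
    l.foldl (fun acc idx => (acc.1 ++ [g idx], acc.2.1 ++ [idx], acc.2.2 ++ [decide (g idx ∉ acc.1)]))
      (P, Q, F)
    = (P ++ l.map g, Q ++ l, F ++ pvFlagsFrom g P l) := by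
  induction l generalizing P Q F with
  | nil => simp [pvFlagsFrom]
  | cons i t ih =>
    rw [List.foldl_cons, ih]
    simp [pvFlagsFrom]

/-- zip of a mapped list with the list itself. -/
lemma pvZipMapSelf (g : Int → String) (l : List Int) :
    (l.map g).zip l = l.map (fun i => (g i, i)) := by
  induction l with
  | nil => rfl
  | cons x t ih => simp [ih]

/-- A's flags, characterised positionally: for a strictly increasing index list, the flag at `i`
says no smaller index of the whole list carries the same window. -/
lemma pvFlagsChar (g : Int → String) (pre t : List Int) (h : (pre ++ t).Pairwise (· < ·)) :
    t.map (fun i => decide (¬ ∃ j ∈ pre ++ t, j < i ∧ g j = g i))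
    = pvFlagsFrom g (pre.map g) t := by
  induction t generalizing pre with
  | nil => rfl
  | cons i t' ih =>
    simp only [List.map_cons, pvFlagsFrom]
    have hra : pre ++ i :: t' = (pre ++ [i]) ++ t' := by simp
    congr 1
    · apply decide_eq_decide.mpr
      have hbound : ∀ j ∈ pre ++ i :: t', j < i → j ∈ pre := by
        intro j hj hji
        rcases List.mem_append.mp hj with hp | hc
        · exact hp
        · exfalso
          rcases List.mem_cons.mp hc with rfl | ht'
          · exact lt_irrefl _ hji
          · have hp2 := (List.pairwise_append.mp h).2.1
            have : i < j := (List.pairwise_cons.mp hp2).1 j ht'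
            omega
      have hpre : ∀ j ∈ pre, j < i := fun j hj =>
        (List.pairwise_append.mp h).2.2 j hj i List.mem_cons_self
      constructor
      · intro hnex hmem
        obtain ⟨j, hj, hgj⟩ := List.mem_map.mp hmem
        exact hnex ⟨j, List.mem_append_left _ hj, hpre j hj, hgj⟩
      · intro hnm ⟨j, hj, hji, hgj⟩
        exact hnm (List.mem_map.mpr ⟨j, hbound j hj hji, hgj⟩)
    · have hih := ih (pre ++ [i]) (by rw [← hra]; exact h)
      rw [show (pre ++ [i]).map g = pre.map g ++ [g i] from by simp] at hih
      rw [← hih]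
      exact List.map_congr_left (fun x _ => by rw [hra])

/-- `sorted2` with fst/snd keys is `sorted` with the lexicographic key (Python's tuple order). -/
lemma pvSorted2Lex (xs : List (String × Int)) :
    PySem.List.sorted2 xs (fun t => t.1) (fun t => t.2)
    = PySem.List.sorted xs (fun t => (toLex t : Lex (String × Int))) := by
  rw [PySem.List.sorted_eq_foldl_insertBy]
  unfold PySem.List.sorted2
  simp only [if_neg Bool.false_ne_true]
  have hbef : (fun (a b : String × Int) => decide (a.1 < b.1) || (!decide (b.1 < a.1) && decide (a.2 < b.2)))
      = fun a b => decide ((toLex a : Lex (String × Int)) < toLex b) := by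
    funext a b
    rcases lt_trichotomy a.1 b.1 with h1 | h1 | h1
    · rw [decide_eq_true h1,
        decide_eq_true (show (toLex a : Lex (String × Int)) < toLex b from Prod.Lex.lt_iff.mpr (Or.inl h1))]
      simp
    · rw [decide_eq_false (show ¬ a.1 < b.1 from by rw [h1]; exact lt_irrefl _),
        decide_eq_false (show ¬ b.1 < a.1 from by rw [h1]; exact lt_irrefl _)]
      have hiff : ((toLex a : Lex (String × Int)) < toLex b) ↔ a.2 < b.2 := by
        rw [Prod.Lex.lt_iff]
        constructor
        · rintro (h | ⟨_, h⟩)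
          · exact absurd (show a.1 < b.1 from h) (h1 ▸ lt_irrefl _)
          · exact h
        · exact fun h => Or.inr ⟨h1, h⟩
      simp only [Bool.false_or, Bool.not_false, Bool.true_and]
      exact (decide_eq_decide.mpr hiff).symm
    · have hnlt : ¬ ((toLex a : Lex (String × Int)) < toLex b) := by
        rw [Prod.Lex.lt_iff]
        rintro (h | ⟨h, _⟩)
        · exact absurd h (not_lt.mpr (le_of_lt h1))
        · exact absurd h (ne_of_gt h1)
      rw [decide_eq_false hnlt, decide_eq_false (not_lt.mpr (le_of_lt h1)), decide_eq_true h1]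
      simp
  rw [← hbef]

/-- Membership in B's adjacent-duplicate list, positionally. -/
lemma pvDupMemIdx (S : List (String × Int)) (q : Int) :
    q ∈ (((S.drop 1).zip S).filter (fun pr => pr.1.1 == pr.2.1)).map (fun pr => pr.1.2)
    ↔ ∃ t, ∃ _ : t + 1 < S.length, (S[t+1].1 = S[t].1 ∧ S[t+1].2 = q) := by
  constructor
  · intro hq
    obtain ⟨pr, hprmem, hq⟩ := List.mem_map.mp hq
    obtain ⟨hprz, heq⟩ := List.mem_filter.mp hprmem
    obtain ⟨t, ht, hget⟩ := List.mem_iff_getElem.mp hprz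
    have htS : t + 1 < S.length := by
      simp [List.length_zip] at ht; omega
    have hpr : pr = (S[t+1], S[t]) := by
      rw [← hget]; simp [List.getElem_zip]
    refine ⟨t, htS, ?_, ?_⟩
    · rw [hpr] at heq; exact beq_iff_eq.mp heq
    · rw [hpr] at hq; exact hq
  · rintro ⟨t, ht, h1, h2⟩
    refine List.mem_map.mpr ⟨(S[t+1], S[t]),
      List.mem_filter.mpr ⟨List.mem_iff_getElem.mpr ⟨t, ?_, ?_⟩, beq_iff_eq.mpr h1⟩, h2⟩
    · simp [List.length_zip]; omega
    · simp [List.getElem_zip]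

/-- For a strictly lex-sorted list of (window, position) pairs, the adjacent-equality scan
collects exactly the positions whose window also occurs at a smaller position. -/
lemma pvDupChar (S : List (String × Int))
    (hpl : S.Pairwise (fun a b => (toLex a : Lex (String × Int)) < toLex b)) (q : Int) :
    q ∈ (((S.drop 1).zip S).filter (fun pr => pr.1.1 == pr.2.1)).map (fun pr => pr.1.2)
    ↔ ∃ p j, (p, q) ∈ S ∧ (p, j) ∈ S ∧ j < q := by
  have hP := List.pairwise_iff_getElem.mp hpl
  rw [pvDupMemIdx]
  constructor
  · rintro ⟨t, ht, h1, h2⟩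
    have hlt := hP t (t+1) (by omega) ht (by omega)
    rw [Prod.Lex.lt_iff] at hlt
    refine ⟨S[t+1].1, S[t].2, ?_, ?_, ?_⟩
    · rw [← h2]
      exact (show (S[t+1].1, S[t+1].2) = S[t+1] from rfl) ▸ List.getElem_mem ht
    · have hx : (S[t+1].1, S[t].2) = S[t] := by rw [h1]
      rw [hx]; exact List.getElem_mem (by omega)
    · rcases hlt with hl | ⟨_, hl⟩
      · exact absurd h1 (ne_of_gt (show S[t].1 < S[t+1].1 from hl))
      · have hl' : S[t].2 < S[t+1].2 := hl
        omega
  · rintro ⟨p, j, hq, hj, hjq⟩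
    obtain ⟨t, ht, hgt⟩ := List.mem_iff_getElem.mp hq
    obtain ⟨s, hs, hgs⟩ := List.mem_iff_getElem.mp hj
    have hst : s < t := by
      rcases lt_trichotomy s t with h | h | h
      · exact h
      · exfalso
        subst h
        rw [hgt] at hgs
        have : q = j := congrArg Prod.snd hgs
        omega
      · exfalso
        have hlt := hP t s ht hs h
        rw [hgt, hgs, Prod.Lex.lt_iff] at hlt
        rcases hlt with hl | ⟨_, hl⟩
        · exact absurd rfl (ne_of_gt (show p < p from hl))
        · exact absurd (show q < j from hl) (by omega)
    have ht1 : t - 1 < S.length := by omega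
    have hfst : S[t-1].1 = p := by
      rcases Nat.lt_or_ge s (t-1) with hcase | hcase
      · have hup := hP s (t-1) hs ht1 hcase
        have hdn := hP (t-1) t ht1 ht (by omega)
        rw [hgs, Prod.Lex.lt_iff] at hup
        rw [hgt, Prod.Lex.lt_iff] at hdn
        have h1 : p ≤ S[t-1].1 := by
          rcases hup with h | ⟨h, _⟩
          · exact le_of_lt (show p < S[t-1].1 from h)
          · exact le_of_eq (show p = S[t-1].1 from h)
        have h2 : S[t-1].1 ≤ p := by
          rcases hdn with h | ⟨h, _⟩
          · exact le_of_lt (show S[t-1].1 < p from h)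
          · exact le_of_eq (show S[t-1].1 = p from h)
        exact le_antisymm h2 h1
      · have he : t - 1 = s := by omega
        simp only [he]
        rw [hgs]
    have hidx : t - 1 + 1 = t := by omega
    refine ⟨t - 1, by omega, ?_, ?_⟩
    · simp only [hidx]
      rw [hgt, hfst]
    · simp only [hidx]
      rw [hgt]

/-- Strict lexicographic pairwise order of the sorted pair list (the snd components are Nodup). -/
lemma pvSortedStrict (l : List Int) (g : Int → String) (hnd : l.Nodup) :
    (PySem.List.sorted (l.map (fun i => (g i, i))) (fun t => (toLex t : Lex (String × Int)))).Pairwise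
      (fun a b => (toLex a : Lex (String × Int)) < toLex b) := by
  have hle := PySem.List.sorted_pairwise (l.map (fun i => (g i, i)))
      (fun t => (toLex t : Lex (String × Int)))
  have hinj : Function.Injective (fun i : Int => (g i, i)) := fun a b h => congrArg Prod.snd h
  have hndp : (l.map (fun i => (g i, i))).Nodup := hnd.map hinj
  have hndS : (PySem.List.sorted (l.map (fun i => (g i, i)))
      (fun t => (toLex t : Lex (String × Int)))).Nodup :=
    ((PySem.List.sorted_perm (l.map (fun i => (g i, i)))
      (fun t => (toLex t : Lex (String × Int))) false).nodup_iff).mpr hndp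
  exact (hle.and hndS).imp (fun h => lt_of_le_of_ne h.1 (fun he => h.2 (toLex.injective he)))

/-- pyRange with step 1 is strictly increasing. -/
lemma pvRangeStrict (a b : Int) : (PySem.List.pyRange a b 1).Pairwise (· < ·) := by
  rw [PySem.List.pyRange_of_pos a b (by norm_num)]
  exact (List.pairwise_lt_range).map _ (fun h => by omega)

/-- Membership of a pair in the self-indexed pair list. -/
lemma pvMemPairs (g : Int → String) (l : List Int) (p : String) (x : Int) :
    (p, x) ∈ l.map (fun i => (g i, i)) ↔ x ∈ l ∧ g x = p := by
  simp only [List.mem_map, Prod.mk.injEq]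
  constructor
  · rintro ⟨i, hi, h1, rfl⟩; exact ⟨hi, h1⟩
  · rintro ⟨hx, h1⟩; exact ⟨x, hx, h1, rfl⟩

-- ===== VERDICT (by name: the statement is the Claim_ definition above) =====
theorem find_protospacers_spec : Claim_equal_find_protospacers := by
  intro seq _
  unfold Spec_find_protospacers
  set g : Int → String := fun i => PySem.Str.slice seq (some i) (some (i + 20)) with hg
  set l : List Int := PySem.List.pyRange 20 (PySem.Str.len seq - 20 - 10) 1 with hl
  have hA : find_protospacers seq = (l.map g, l, pvFlagsFrom g [] l) := by
    have h := pvFoldA g l [] [] []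
    unfold find_protospacers
    simpa using h
  have hstrict : l.Pairwise (· < ·) := pvRangeStrict _ _
  have hnd : l.Nodup := hstrict.imp (fun h => ne_of_lt h)
  rw [hA]
  unfold find_protospacers_alt
  simp only [← hg, ← hl, pvZipMapSelf, pvSorted2Lex]
  refine Prod.ext rfl (Prod.ext rfl ?_)
  set S := PySem.List.sorted (l.map (fun i => (g i, i)))
      (fun t => (toLex t : Lex (String × Int))) with hS
  have hpl := pvSortedStrict l g hnd
  have hmemS : ∀ (p : String) (x : Int), (p, x) ∈ S ↔ x ∈ l ∧ g x = p := by
    intro p x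
    rw [hS, (PySem.List.sorted_perm _ _ _).mem_iff, pvMemPairs]
  have hflag : ∀ i ∈ l,
      (!(PySem.Set.contains (PySem.Set.ofList
          ((((S.drop 1).zip S).filter (fun pr => pr.1.1 == pr.2.1)).map (fun pr => pr.1.2))) i))
      = decide (¬ ∃ j ∈ l, j < i ∧ g j = g i) := by
    intro i hi
    rw [decide_not]
    have hc : PySem.Set.contains (PySem.Set.ofList
          ((((S.drop 1).zip S).filter (fun pr => pr.1.1 == pr.2.1)).map (fun pr => pr.1.2))) i
        = decide (∃ j ∈ l, j < i ∧ g j = g i) := by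
      rw [Bool.eq_iff_iff, PySem.Set.contains_iff, decide_eq_true_iff, PySem.Set.mem_ofList,
        pvDupChar S hpl]
      constructor
      · rintro ⟨p, j, hq, hj, hjq⟩
        obtain ⟨hjl, hgj⟩ := (hmemS p j).mp hj
        obtain ⟨_, hgi⟩ := (hmemS p i).mp hq
        exact ⟨j, hjl, hjq, by rw [hgj, hgi]⟩
      · rintro ⟨j, hjl, hjq, hgj⟩
        exact ⟨g i, j, (hmemS (g i) i).mpr ⟨hi, rfl⟩, (hmemS (g i) j).mpr ⟨hjl, hgj⟩, hjq⟩
    rw [hc]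
  rw [List.map_congr_left hflag]
  have := pvFlagsChar g [] l (by simpa using hstrict)
  simpa using this.symm
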